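-- pv_equiv track=rewrite | github.com/KYZZHECIK/information-retrieval | A1/score.py | _min_window_size
-- ===== SOURCE A (Python) =====
-- def _min_window_size(position_lists: list[list[int]]) -> int:
--     """Find the minimum window containing at least one element from each list.
--
--     Uses a pointer-based sweep algorithm. O(n log k) where n = total positions.
--     Returns the window size, or a large number if impossible.
--     """
--     k = len(position_lists)
--     if k <= 1:
--         return 1
--
--     # Initialize pointers: (position, list_index)
--     import heapq as hq
--     pointers = []
--     max_pos = 0
--     for i, plist in enumerate(position_lists):
--         if not plist:
--             return 10000  # term not in this doc
--         pointers.append((plist[0], i, 0))  # (pos, list_idx, offset_in_list)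
--         max_pos = max(max_pos, plist[0])
--     hq.heapify(pointers)
--
--     best = max_pos - pointers[0][0] + 1
--
--     while True:
--         min_pos, list_idx, offset = hq.heappop(pointers)
--         offset += 1
--         if offset >= len(position_lists[list_idx]):
--             break
--         new_pos = position_lists[list_idx][offset]
--         max_pos = max(max_pos, new_pos)
--         hq.heappush(pointers, (new_pos, list_idx, offset))
--         window = max_pos - pointers[0][0] + 1
--         if window < best:
--             best = window
--
--     return best
-- ===== SOURCE B (Python) =====
-- def _min_window_size(position_lists: list[list[int]]) -> int:
--     """Minimum window covering one position from each list.
--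
--     No heap: keep the remaining suffix of every list and, each round, rescan
--     the current fronts for the first minimal one, advance it, and track the
--     running max and the best window.
--     """
--     if len(position_lists) <= 1:
--         return 1
--     if any(not pl for pl in position_lists):
--         return 10000
--     rest = list(position_lists)
--     hi = 0
--     for pl in rest:
--         hi = max(hi, pl[0])
--     best = hi - min(pl[0] for pl in rest) + 1
--     while True:
--         fronts = [pl[0] for pl in rest]
--         j = fronts.index(min(fronts))
--         if len(rest[j]) == 1:
--             return best
--         rest[j] = rest[j][1:]
--         hi = max(hi, rest[j][0])
--         best = min(best, hi - min(pl[0] for pl in rest) + 1)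
-- ===== Notes on version B (the rewrite author's own statement) =====
-- stated objective: simpler
-- what changed: Removes the binary-heap machinery (hand-fed heapify/heappush/heappop over (pos, list_idx, offset) tuples) entirely: B keeps the remaining suffix of every list and, each round, rescans the current fronts for the first minimal one, drops it, and updates the running max and best window directly.
import Mathlib
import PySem

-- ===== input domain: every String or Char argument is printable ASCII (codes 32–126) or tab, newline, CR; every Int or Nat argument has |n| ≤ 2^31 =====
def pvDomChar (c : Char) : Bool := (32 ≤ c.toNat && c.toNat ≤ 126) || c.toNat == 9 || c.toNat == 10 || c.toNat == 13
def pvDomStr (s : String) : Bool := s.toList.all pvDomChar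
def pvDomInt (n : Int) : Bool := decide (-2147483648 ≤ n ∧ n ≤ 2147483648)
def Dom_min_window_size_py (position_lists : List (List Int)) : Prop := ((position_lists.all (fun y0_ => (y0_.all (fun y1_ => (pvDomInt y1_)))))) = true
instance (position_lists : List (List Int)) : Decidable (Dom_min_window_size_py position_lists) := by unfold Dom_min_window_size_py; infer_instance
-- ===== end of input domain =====

-- B replaces A's hand-fed binary heap by rescanning the current list fronts; objective: simpler.

-- ===== PORT A =====
-- Python tuple (pos, list_idx, offset); pvD is the dummy default for total indexing
-- (every index used is in range when the Python does not raise).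
def pvD : Int × Int × Int := (0, 0, 0)

-- Python's `<` on int 3-tuples (lexicographic).
def pvLt (a b : Int × Int × Int) : Bool :=
  decide (a.1 < b.1) || (decide (a.1 = b.1) &&
    (decide (a.2.1 < b.2.1) || (decide (a.2.1 = b.2.1) && decide (a.2.2 < b.2.2))))

-- heapq._siftdown(heap, startpos, pos): the while-loop, with newitem = heap[pos] read by the caller.
def pvSiftdownLoop (newitem : Int × Int × Int) (heap : List (Int × Int × Int))
    (startpos pos : Nat) : List (Int × Int × Int) :=
  if _h : startpos < pos then
    let parentpos := (pos - 1) / 2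
    let parent := heap.getD parentpos pvD
    if pvLt newitem parent then
      pvSiftdownLoop newitem (heap.set pos parent) startpos parentpos
    else heap.set pos newitem
  else heap.set pos newitem
termination_by pos
decreasing_by omega

def pvSiftdown (heap : List (Int × Int × Int)) (startpos pos : Nat) : List (Int × Int × Int) :=
  pvSiftdownLoop (heap.getD pos pvD) heap startpos pos

-- heapq._siftup(heap, pos): first the leaf-ward while-loop …
def pvSiftupLoop (heap : List (Int × Int × Int)) (pos : Nat) : List (Int × Int × Int) × Nat :=
  let endpos := heap.length
  let childpos := 2 * pos + 1
  if _h : childpos < endpos then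
    let rightpos := childpos + 1
    let childpos :=
      if rightpos < endpos && !(pvLt (heap.getD childpos pvD) (heap.getD rightpos pvD))
      then rightpos else childpos
    pvSiftupLoop (heap.set pos (heap.getD childpos pvD)) childpos
  else (heap, pos)
termination_by heap.length - pos
decreasing_by simp only [List.length_set]; split <;> omega

-- … then heap[pos] = newitem and the trailing _siftdown.
def pvSiftup (heap : List (Int × Int × Int)) (pos : Nat) : List (Int × Int × Int) :=
  let startpos := pos
  let newitem := heap.getD pos pvD
  let r := pvSiftupLoop heap pos
  pvSiftdown (r.1.set r.2 newitem) startpos r.2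

-- heapq.heappush
def pvHeappush (heap : List (Int × Int × Int)) (item : Int × Int × Int) : List (Int × Int × Int) :=
  pvSiftdown (heap ++ [item]) 0 ((heap ++ [item]).length - 1)

-- heapq.heappop; (returned item, new heap).  heap.pop() on [] raises IndexError in
-- Python — never reached here (the heap always holds k ≥ 2 tuples); default pvD.
def pvHeappop (heap : List (Int × Int × Int)) : (Int × Int × Int) × List (Int × Int × Int) :=
  let lastelt := heap.getLast?.getD pvD
  let rest := heap.dropLast
  if rest.isEmpty then (lastelt, rest)
  else
    let returnitem := rest.getD 0 pvD
    (returnitem, pvSiftup (rest.set 0 lastelt) 0)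

-- heapq.heapify: for i in reversed(range(n//2)): _siftup(x, i)
def pvHeapify (heap : List (Int × Int × Int)) : List (Int × Int × Int) :=
  (List.range (heap.length / 2)).reverse.foldl (fun h i => pvSiftup h i) heap

-- the `for i, plist in enumerate(position_lists)` build loop with its early `return 10000`
def pvBuildGo : List (List Int) → Int → List (Int × Int × Int) → Int →
    Option (List (Int × Int × Int) × Int)
  | [], _, ptrs, mx => some (ptrs, mx)
  | pl :: tl, i, ptrs, mx =>
    match pl with
    | [] => none
    | p0 :: _ => pvBuildGo tl (i + 1) (ptrs ++ [(p0, i, 0)]) (max mx p0)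

-- the `while True` loop; fuel exceeds the number of pops the Python performs
-- (each pop but the last advances one offset), so the 0 branch is never taken.
def pvALoop (pls : List (List Int)) :
    Nat → List (Int × Int × Int) → Int → Int → Int
  | 0, _, _, best => best
  | fuel + 1, heap, maxPos, best =>
    let pr := pvHeappop heap
    let listIdx := pr.1.2.1
    let offset := pr.1.2.2 + 1
    let plist := (PySem.List.pyGet? pls listIdx).getD []
    if (plist.length : Int) ≤ offset then best
    else
      let newPos := (PySem.List.pyGet? plist offset).getD 0
      let maxPos' := max maxPos newPos
      let h2 := pvHeappush pr.2 (newPos, listIdx, offset)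
      let window := maxPos' - (h2.getD 0 pvD).1 + 1
      pvALoop pls fuel h2 maxPos' (if window < best then window else best)

def min_window_size_py (position_lists : List (List Int)) : Int :=
  if position_lists.length ≤ 1 then 1
  else
    match pvBuildGo position_lists 0 [] 0 with
    | none => 10000
    | some (pointers, maxPos) =>
      let heap := pvHeapify pointers
      let best := maxPos - (heap.getD 0 pvD).1 + 1
      pvALoop position_lists ((position_lists.map List.length).sum + 1) heap maxPos best

-- ===== PORT B =====
-- fronts = [pl[0] for pl in rest]  (every pl nonempty whenever this is read)
def pvFronts (rest : List (List Int)) : List Int := rest.map (fun pl => pl.headD 0)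

-- the `while True` loop of B: pick the first list with the minimal front,
-- drop its front, update the running max and the best window.
def pvBLoop : Nat → List (List Int) → Int → Int → Int
  | 0, _, _, best => best
  | fuel + 1, rest, hi, best =>
    let fronts := pvFronts rest
    let j := (PySem.List.index? fronts ((PySem.List.min? fronts (fun x => x)).getD 0)).getD 0
    let rj := rest.getD j []
    if rj.length == 1 then best
    else
      let rest' := rest.set j rj.tail
      let hi' := max hi ((rest'.getD j []).headD 0)
      pvBLoop fuel rest' hi'
        (min best (hi' - ((PySem.List.min? (pvFronts rest') (fun x => x)).getD 0) + 1))

def min_window_size_py_alt (position_lists : List (List Int)) : Int :=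
  if position_lists.length ≤ 1 then 1
  else if position_lists.any (fun pl => pl.isEmpty) then 10000
  else
    let hi := position_lists.foldl (fun m pl => max m (pl.headD 0)) 0
    let best := hi - ((PySem.List.min? (pvFronts position_lists) (fun x => x)).getD 0) + 1
    pvBLoop ((position_lists.map List.length).sum + 1) position_lists hi best

-- ===== PRECONDITION & SPEC =====
def Spec_min_window_size_py (position_lists : List (List Int)) (out : Int) : Prop := out = min_window_size_py_alt position_lists
instance (position_lists : List (List Int)) (out : Int) : Decidable (Spec_min_window_size_py position_lists out) := by unfold Spec_min_window_size_py; infer_instance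

-- ===== CLAIM (what is proved, stated in full; the proofs are below) =====
def Claim_equal_min_window_size_py : Prop := ∀ (position_lists : List (List Int)), Dom_min_window_size_py position_lists → Spec_min_window_size_py position_lists (min_window_size_py position_lists)

-- ===== LEMMAS AND PROOFS =====

-- ---- order facts about Python's tuple `<` ----
def pvLe (a b : Int × Int × Int) : Bool := !(pvLt b a)

theorem pvLt_iff (a b : Int × Int × Int) : pvLt a b = true ↔
    (a.1 < b.1 ∨ (a.1 = b.1 ∧ (a.2.1 < b.2.1 ∨ (a.2.1 = b.2.1 ∧ a.2.2 < b.2.2)))) := by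
  simp [pvLt]

theorem pvLe_iff (a b : Int × Int × Int) : pvLe a b = true ↔
    ¬ (b.1 < a.1 ∨ (b.1 = a.1 ∧ (b.2.1 < a.2.1 ∨ (b.2.1 = a.2.1 ∧ b.2.2 < a.2.2)))) := by
  have h : pvLe a b = true ↔ ¬ (pvLt b a = true) := by simp [pvLe]
  rw [h, pvLt_iff]

theorem pvLe_refl (a : Int × Int × Int) : pvLe a a = true := by
  simp [pvLe_iff]

theorem pvLe_of_lt {a b : Int × Int × Int} (h : pvLt a b = true) : pvLe a b = true := by
  rw [pvLt_iff] at h; rw [pvLe_iff]; omega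

theorem pvLe_of_not_lt {a b : Int × Int × Int} (h : ¬ pvLt a b = true) : pvLe b a = true := by
  simp [pvLe, h]

theorem pvLe_trans {a b c : Int × Int × Int} (h1 : pvLe a b = true) (h2 : pvLe b c = true) :
    pvLe a c = true := by
  rw [pvLe_iff] at h1 h2 ⊢; omega

theorem pvLe_antisymm {a b : Int × Int × Int} (h1 : pvLe a b = true) (h2 : pvLe b a = true) :
    a = b := by
  rw [pvLe_iff] at h1 h2
  obtain ⟨a1, a2, a3⟩ := a; obtain ⟨b1, b2, b3⟩ := b
  simp_all; omega

-- ---- getD/set helpers ----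
theorem pvGetD_set_self {α : Type} {a : List α} {i : Nat} (h : i < a.length)
    (v d : α) : (a.set i v).getD i d = v := by
  simp [List.getD, List.getElem?_set_self h]

theorem pvGetD_set_ne {α : Type} {a : List α} {i j : Nat} (h : i ≠ j)
    (v d : α) : (a.set i v).getD j d = a.getD j d := by
  simp [List.getD, List.getElem?_set_ne h]

theorem pvHeadD_drop (l : List Int) (k : Nat) (d : Int) : (l.drop k).headD d = l.getD k d := by
  rw [List.headD_eq_head?_getD, List.head?_drop, List.getD_eq_getElem?_getD]

-- multiset effect of one assignment
theorem pvMsSet : ∀ (a : List (Int × Int × Int)) (i : Nat), i < a.length → ∀ v,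
    ((a.set i v : List (Int × Int × Int)) : Multiset (Int × Int × Int)) + {a.getD i pvD}
      = {v} + (a : Multiset (Int × Int × Int))
  | [], i, h, v => by simp at h
  | x :: t, 0, _, v => by
    simp only [List.set, List.getD_cons_zero]
    rw [← Multiset.cons_coe, ← Multiset.cons_coe, add_comm, Multiset.singleton_add]
    exact Multiset.cons_swap x v ↑t
  | x :: t, i + 1, h, v => by
    simp only [List.set, List.getD_cons_succ]
    rw [← Multiset.cons_coe, ← Multiset.cons_coe]
    rw [Multiset.cons_add, Multiset.singleton_add, Multiset.cons_swap]
    congr 1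
    rw [← Multiset.singleton_add, pvMsSet t i (by simpa using h) v]

-- ---- ancestor-or-self in the implicit binary tree ----
def pvAnc (r j : Nat) : Bool :=
  if j = r then true else if j = 0 then false else pvAnc r ((j - 1) / 2)
termination_by j
decreasing_by omega

theorem pvAnc_self (r : Nat) : pvAnc r r = true := by rw [pvAnc]; simp

theorem pvAnc_le : ∀ {r j : Nat}, pvAnc r j = true → r ≤ j := by
  intro r j
  induction j using Nat.strong_induction_on with
  | _ j ih =>
    rw [pvAnc]
    split
    · omega
    · split
      · simp
      · intro h; have := ih ((j - 1) / 2) (by omega) h; omega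

theorem pvAnc_zero : ∀ (j : Nat), pvAnc 0 j = true := by
  intro j
  induction j using Nat.strong_induction_on with
  | _ j ih =>
    rw [pvAnc]
    by_cases h0 : j = 0
    · simp [h0]
    · simp only [h0, if_false]
      exact ih ((j - 1) / 2) (by omega)

theorem pvAnc_parent {r j : Nat} (h : pvAnc r j = true) (hne : j ≠ r) :
    pvAnc r ((j - 1) / 2) = true := by
  rw [pvAnc] at h
  rcases Nat.eq_zero_or_pos j with hj | hj
  · subst hj; simp [hne] at h
  · simpa [hne, Nat.pos_iff_ne_zero.mp hj] using h

theorem pvAnc_child {r j c : Nat} (h : pvAnc r j = true)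
    (hc : c = 2 * j + 1 ∨ c = 2 * j + 2) : pvAnc r c = true := by
  rw [pvAnc]
  have hpar : (c - 1) / 2 = j := by omega
  split
  · rfl
  · split
    · omega
    · rwa [hpar]

-- edge (parent (j-1)/2 → j) respects the heap order
def pvEdgeOK (a : List (Int × Int × Int)) (j : Nat) : Prop :=
  pvLe (a.getD ((j - 1) / 2) pvD) (a.getD j pvD) = true

def pvIsHeap (a : List (Int × Int × Int)) : Prop :=
  ∀ j, 0 < j → j < a.length → pvEdgeOK a j

-- one assignment a[pos] := newitem, when newitem fits both above and below
theorem pvSd_base (newitem : Int × Int × Int) (s : Nat) (pos : Nat) (a : List (Int × Int × Int))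
    (hlen : pos < a.length) (hanc : pvAnc s pos = true)
    (H1 : ∀ j, 0 < j → j < a.length → pvAnc s ((j - 1) / 2) = true → j ≠ pos → pvEdgeOK a j)
    (H2 : ∀ c, (c = 2 * pos + 1 ∨ c = 2 * pos + 2) → c < a.length →
      pvLe newitem (a.getD c pvD) = true)
    (Hin : 0 < pos → pvAnc s ((pos - 1) / 2) = true →
      pvLe (a.getD ((pos - 1) / 2) pvD) newitem = true) :
    (a.set pos newitem).length = a.length ∧
    (∀ m, pvAnc s m = false → (a.set pos newitem).getD m pvD = a.getD m pvD) ∧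
    (∀ j, 0 < j → j < a.length → pvAnc s ((j - 1) / 2) = true →
      pvEdgeOK (a.set pos newitem) j) ∧
    ((a.set pos newitem : List _) : Multiset (Int × Int × Int))
      = ((a.set pos newitem : List _) : Multiset _) := by
  refine ⟨by simp, ?_, ?_, rfl⟩
  · intro m hm
    exact pvGetD_set_ne (fun h => by rw [h] at hanc; simp [hanc] at hm) _ _
  · intro j hj hjlen hancp
    by_cases hjp : j = pos
    · subst hjp
      unfold pvEdgeOK
      have hpar : j ≠ (j - 1) / 2 := by omega
      rw [pvGetD_set_ne hpar, pvGetD_set_self hlen]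
      exact Hin hj hancp
    · by_cases hcp : (j - 1) / 2 = pos
      · unfold pvEdgeOK
        rw [hcp, pvGetD_set_self hlen, pvGetD_set_ne (Ne.symm hjp)]
        exact H2 j (by omega) hjlen
      · unfold pvEdgeOK
        rw [pvGetD_set_ne (fun h => hcp h.symm), pvGetD_set_ne (Ne.symm hjp)]
        exact H1 j hj hjlen hancp hjp

theorem pvSd_spec (newitem : Int × Int × Int) (s : Nat) : ∀ (pos : Nat) (a : List (Int × Int × Int)),
    pos < a.length → pvAnc s pos = true →
    (∀ j, 0 < j → j < a.length → pvAnc s ((j - 1) / 2) = true → j ≠ pos → pvEdgeOK a j) →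
    (∀ c, (c = 2 * pos + 1 ∨ c = 2 * pos + 2) → c < a.length →
      pvLe newitem (a.getD c pvD) = true) →
    ((pos ≠ s) → ∀ c, (c = 2 * pos + 1 ∨ c = 2 * pos + 2) → c < a.length →
      pvLe (a.getD ((pos - 1) / 2) pvD) (a.getD c pvD) = true) →
    (pvSiftdownLoop newitem a s pos).length = a.length ∧
    (∀ m, pvAnc s m = false → (pvSiftdownLoop newitem a s pos).getD m pvD = a.getD m pvD) ∧
    (∀ j, 0 < j → j < a.length → pvAnc s ((j - 1) / 2) = true →
      pvEdgeOK (pvSiftdownLoop newitem a s pos) j) ∧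
    ((pvSiftdownLoop newitem a s pos : List _) : Multiset (Int × Int × Int))
      = ((a.set pos newitem : List _) : Multiset _) := by
  intro pos
  induction pos using Nat.strong_induction_on with
  | _ pos ih =>
    intro a hlen hanc H1 H2 H3
    rw [pvSiftdownLoop]
    by_cases hsp : s < pos
    · rw [dif_pos hsp]
      simp only []
      by_cases hlt : pvLt newitem (a.getD ((pos - 1) / 2) pvD) = true
      · rw [if_pos hlt]
        -- recursive step: move the parent down into slot pos, continue at parentpos
        set parentpos := (pos - 1) / 2 with hpp
        set parent := a.getD parentpos pvD with hpar
        set b := a.set pos parent with hb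
        have hppos : parentpos < pos := by omega
        have hplen : parentpos < b.length := by simp [hb]; omega
        have hblen : b.length = a.length := by simp [hb]
        have hpanc : pvAnc s parentpos = true := pvAnc_parent hanc (by omega)
        have hgb_par : b.getD parentpos pvD = parent := pvGetD_set_ne (by omega) _ _
        have hgb_pos : b.getD pos pvD = parent := pvGetD_set_self hlen _ _
        have hgb_other : ∀ m, m ≠ pos → b.getD m pvD = a.getD m pvD := fun m hm =>
          pvGetD_set_ne (Ne.symm hm) _ _
        -- the good-sibling fact: parent ≤ a[c] for any child c of parentpos other than pos
        have hsib : ∀ c, (c = 2 * parentpos + 1 ∨ c = 2 * parentpos + 2) → c < a.length →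
            c ≠ pos → pvLe parent (a.getD c pvD) = true := by
          intro c hc hclen hcp
          have : pvEdgeOK a c := H1 c (by omega) hclen (by
            have : (c - 1) / 2 = parentpos := by omega
            rw [this]; exact hpanc) hcp
          unfold pvEdgeOK at this
          have hcc : (c - 1) / 2 = parentpos := by omega
          rwa [hcc] at this
        have H1' : ∀ j, 0 < j → j < b.length → pvAnc s ((j - 1) / 2) = true →
            j ≠ parentpos → pvEdgeOK b j := by
          intro j hj hjl hap hjp
          rw [hblen] at hjl
          by_cases hjpos : j = pos
          · subst hjpos
            unfold pvEdgeOK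
            rw [show (j - 1) / 2 = parentpos from rfl, hgb_par, hgb_pos]
            exact pvLe_refl parent
          · by_cases hcp : (j - 1) / 2 = pos
            · unfold pvEdgeOK
              rw [hcp, hgb_pos, hgb_other j hjpos]
              exact H3 (by omega) j (by omega) hjl
            · unfold pvEdgeOK
              rw [hgb_other _ hcp, hgb_other j hjpos]
              exact H1 j hj hjl hap hjpos
        have H2' : ∀ c, (c = 2 * parentpos + 1 ∨ c = 2 * parentpos + 2) → c < b.length →
            pvLe newitem (b.getD c pvD) = true := by
          intro c hc hcl
          rw [hblen] at hcl
          by_cases hcpos : c = pos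
          · subst hcpos; rw [hgb_pos]; exact pvLe_of_lt hlt
          · rw [hgb_other c hcpos]
            exact pvLe_trans (pvLe_of_lt hlt) (hsib c hc hcl hcpos)
        have H3' : (parentpos ≠ s) → ∀ c, (c = 2 * parentpos + 1 ∨ c = 2 * parentpos + 2) →
            c < b.length → pvLe (b.getD ((parentpos - 1) / 2) pvD) (b.getD c pvD) = true := by
          intro hpns c hc hcl
          rw [hblen] at hcl
          have hspp : s < parentpos := by
            have := pvAnc_le hpanc; omega
          have hedgepp : pvEdgeOK a parentpos :=
            H1 parentpos (by omega) (by omega) (pvAnc_parent hpanc hpns) (by omega)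
          unfold pvEdgeOK at hedgepp
          rw [hgb_other ((parentpos - 1) / 2) (by omega)]
          by_cases hcpos : c = pos
          · subst hcpos; rw [hgb_pos]; exact hedgepp
          · rw [hgb_other c hcpos]
            exact pvLe_trans hedgepp (hsib c hc hcl hcpos)
        obtain ⟨len', unt', edges', ms'⟩ := ih parentpos hppos b hplen hpanc H1' H2' H3'
        refine ⟨by rw [len', hblen], ?_, ?_, ?_⟩
        · intro m hm
          have hmp : m ≠ pos := fun h => by rw [h] at hm; rw [hanc] at hm; simp at hm
          rw [unt' m hm, hgb_other m hmp]
        · intro j hj hjl hap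
          exact edges' j hj (by rw [hblen]; exact hjl) hap
        · have e1 := pvMsSet b parentpos hplen newitem
          rw [hgb_par] at e1
          have e2 := pvMsSet a pos hlen parent
          have e3 := pvMsSet a pos hlen newitem
          rw [← hb] at e2
          have key : (pvSiftdownLoop newitem b s parentpos : Multiset (Int × Int × Int))
                + ({parent} + {a.getD pos pvD})
              = ((a.set pos newitem : List _) : Multiset (Int × Int × Int))
                + ({parent} + {a.getD pos pvD}) := by
            calc (pvSiftdownLoop newitem b s parentpos : Multiset (Int × Int × Int))
                  + ({parent} + {a.getD pos pvD})
                = (((b.set parentpos newitem : List _) : Multiset (Int × Int × Int))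
                    + {parent}) + {a.getD pos pvD} := by rw [ms', ← add_assoc]
              _ = ({newitem} + (b : Multiset (Int × Int × Int))) + {a.getD pos pvD} := by
                    rw [e1]
              _ = {newitem} + ((b : Multiset (Int × Int × Int)) + {a.getD pos pvD}) := by
                    rw [add_assoc]
              _ = {newitem} + ({parent} + (a : Multiset (Int × Int × Int))) := by rw [e2]
              _ = {parent} + ({newitem} + (a : Multiset (Int × Int × Int))) := by
                    rw [add_left_comm]
              _ = {parent} + (((a.set pos newitem : List _) : Multiset (Int × Int × Int))
                    + {a.getD pos pvD}) := by rw [e3]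
              _ = ((a.set pos newitem : List _) : Multiset (Int × Int × Int))
                    + ({parent} + {a.getD pos pvD}) := by rw [add_left_comm]
          exact add_right_cancel key
      · rw [if_neg hlt]
        exact pvSd_base newitem s pos a hlen hanc H1 H2
          (fun _ _ => pvLe_of_not_lt hlt)
    · have hps : pos = s := by
        have := pvAnc_le hanc; omega
      rw [dif_neg hsp]
      refine pvSd_base newitem s pos a hlen hanc H1 H2 ?_
      intro hpos hancp
      exfalso
      have := pvAnc_le hancp
      omega

theorem pvSu_spec (r : Nat) : ∀ (n : Nat) (a : List (Int × Int × Int)) (pos : Nat),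
    a.length - pos = n → pos < a.length → pvAnc r pos = true →
    (∀ j, 0 < j → j < a.length → pvAnc r ((j - 1) / 2) = true → (j - 1) / 2 ≠ pos →
      pvEdgeOK a j) →
    ((pos ≠ r) → ∀ c, (c = 2 * pos + 1 ∨ c = 2 * pos + 2) → c < a.length →
      pvLe (a.getD ((pos - 1) / 2) pvD) (a.getD c pvD) = true) →
    (pvSiftupLoop a pos).1.length = a.length ∧
    (pvSiftupLoop a pos).2 < a.length ∧
    pvAnc r (pvSiftupLoop a pos).2 = true ∧
    a.length ≤ 2 * (pvSiftupLoop a pos).2 + 1 ∧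
    (∀ m, pvAnc r m = false → (pvSiftupLoop a pos).1.getD m pvD = a.getD m pvD) ∧
    (∀ j, 0 < j → j < a.length → pvAnc r ((j - 1) / 2) = true →
      (j - 1) / 2 ≠ (pvSiftupLoop a pos).2 → pvEdgeOK (pvSiftupLoop a pos).1 j) ∧
    (∀ x, (((pvSiftupLoop a pos).1.set (pvSiftupLoop a pos).2 x : List _) :
        Multiset (Int × Int × Int))
      = ((a.set pos x : List _) : Multiset _)) := by
  intro n
  induction n using Nat.strong_induction_on with
  | _ n ih =>
    intro a pos hn hlen hanc K1 K2
    rw [pvSiftupLoop]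
    by_cases hc : 2 * pos + 1 < a.length
    · rw [dif_pos hc]
      simp only []
      set cp := if (decide (2 * pos + 1 + 1 < a.length) &&
          !pvLt (a.getD (2 * pos + 1) pvD) (a.getD (2 * pos + 1 + 1) pvD)) = true
        then 2 * pos + 1 + 1 else 2 * pos + 1 with hcp
      have hcpor : cp = 2 * pos + 1 ∨ cp = 2 * pos + 2 := by
        rw [hcp]; split <;> omega
      have hcplen : cp < a.length := by
        rw [hcp]; split
        · next hq => simp at hq; omega
        · exact hc
      have hpcp : pos < cp := by omega
      have hmin : ∀ c', (c' = 2 * pos + 1 ∨ c' = 2 * pos + 2) → c' < a.length →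
          pvLe (a.getD cp pvD) (a.getD c' pvD) = true := by
        intro c' hc' hc'len
        rw [hcp]
        split
        · next hq =>
          simp only [Bool.and_eq_true, decide_eq_true_eq, Bool.not_eq_true'] at hq
          rcases hc' with h | h
          · subst h; exact pvLe_of_not_lt (by simp only [hq.2]; simp)
          · subst h; exact pvLe_refl _
        · next hq =>
          rcases hc' with h | h
          · subst h; exact pvLe_refl _
          · subst h
            simp only [Bool.and_eq_true, decide_eq_true_eq, Bool.not_eq_true'] at hq
            have : pvLt (a.getD (2 * pos + 1) pvD) (a.getD (2 * pos + 1 + 1) pvD) = true := by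
              by_contra hx
              exact hq ⟨by omega, by simpa using hx⟩
            exact pvLe_of_lt this
      set C := a.getD cp pvD with hC
      set b := a.set pos C with hb
      have hblen : b.length = a.length := by simp [hb]
      have hgb_pos : b.getD pos pvD = C := pvGetD_set_self hlen _ _
      have hgb_other : ∀ m, m ≠ pos → b.getD m pvD = a.getD m pvD := fun m hm =>
        pvGetD_set_ne (Ne.symm hm) _ _
      have hanccp : pvAnc r cp = true := pvAnc_child hanc hcpor
      have K1' : ∀ j, 0 < j → j < b.length → pvAnc r ((j - 1) / 2) = true →
          (j - 1) / 2 ≠ cp → pvEdgeOK b j := by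
        intro j hj hjl hap hjcp
        rw [hblen] at hjl
        by_cases hjeq : j = cp
        · unfold pvEdgeOK
          rw [hjeq]
          have hparj : (cp - 1) / 2 = pos := by omega
          rw [hparj, hgb_pos, hgb_other cp (by omega)]
          exact pvLe_refl _
        · by_cases hjpar : (j - 1) / 2 = pos
          · by_cases hjpos : j = pos
            · exfalso; omega
            · unfold pvEdgeOK
              rw [hjpar, hgb_pos, hgb_other j hjpos]
              exact hmin j (by omega) hjl
          · by_cases hjpos : j = pos
            · unfold pvEdgeOK
              rw [hjpos] at hap
              rw [hjpos]
              rw [hgb_other _ (by omega : (pos - 1) / 2 ≠ pos), hgb_pos]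
              by_cases hjr : pos = r
              · exfalso; have := pvAnc_le hap; omega
              · exact K2 hjr cp hcpor hcplen
            · unfold pvEdgeOK
              rw [hgb_other _ hjpar, hgb_other j hjpos]
              exact K1 j hj hjl hap hjpar
      have K2' : (cp ≠ r) → ∀ g, (g = 2 * cp + 1 ∨ g = 2 * cp + 2) → g < b.length →
          pvLe (b.getD ((cp - 1) / 2) pvD) (b.getD g pvD) = true := by
        intro _ g hg hgl
        rw [hblen] at hgl
        have hparcp : (cp - 1) / 2 = pos := by omega
        rw [hparcp, hgb_pos, hgb_other g (by omega)]
        have hk := K1 g (by omega) hgl (by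
            have : (g - 1) / 2 = cp := by omega
            rw [this]; exact hanccp) (by omega)
        unfold pvEdgeOK at hk
        rw [show (g - 1) / 2 = cp from by omega] at hk
        exact hk
      obtain ⟨len', plt', panc', pleaf', unt', edges', ms'⟩ :=
        ih (a.length - cp) (by omega) b cp (by rw [hblen]) (by omega) hanccp K1' K2'
      rw [hblen] at len' plt' pleaf'
      refine ⟨len', plt', panc', pleaf', ?_, ?_, ?_⟩
      · intro m hm
        have hmp : m ≠ pos := fun h => by rw [h] at hm; rw [hanc] at hm; simp at hm
        rw [unt' m hm, hgb_other m hmp]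
      · intro j hj hjl hap hjp
        exact edges' j hj (by rw [hblen]; exact hjl) hap hjp
      · intro x
        rw [ms' x]
        have e1 := pvMsSet a pos hlen C
        rw [← hb] at e1
        have e2 := pvMsSet a pos hlen x
        have hgbcp : b.getD cp pvD = C := by rw [hgb_other cp (by omega), hC]
        have e0 := pvMsSet b cp (by rw [hblen]; exact hcplen) x
        rw [hgbcp] at e0
        have key : ((b.set cp x : List _) : Multiset (Int × Int × Int)) + ({C} + {a.getD pos pvD})
            = ((a.set pos x : List _) : Multiset (Int × Int × Int)) + ({C} + {a.getD pos pvD}) := by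
          calc ((b.set cp x : List _) : Multiset (Int × Int × Int)) + ({C} + {a.getD pos pvD})
              = (((b.set cp x : List _) : Multiset (Int × Int × Int)) + {C}) + {a.getD pos pvD} := by
                rw [← add_assoc]
            _ = ({x} + (b : Multiset (Int × Int × Int))) + {a.getD pos pvD} := by rw [e0]
            _ = {x} + ((b : Multiset (Int × Int × Int)) + {a.getD pos pvD}) := by rw [add_assoc]
            _ = {x} + ({C} + (a : Multiset (Int × Int × Int))) := by rw [e1]
            _ = {C} + ({x} + (a : Multiset (Int × Int × Int))) := by rw [add_left_comm]
            _ = {C} + (((a.set pos x : List _) : Multiset (Int × Int × Int)) + {a.getD pos pvD}) := by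
                rw [e2]
            _ = ((a.set pos x : List _) : Multiset (Int × Int × Int)) + ({C} + {a.getD pos pvD}) := by
                rw [add_left_comm]
        exact add_right_cancel key
    · rw [dif_neg hc]
      exact ⟨rfl, hlen, hanc, by omega, fun _ _ => rfl,
        fun j hj hjl hap hjp => K1 j hj hjl hap hjp, fun _ => rfl⟩

theorem pvSiftup_spec (a : List (Int × Int × Int)) (pos : Nat) (hlen : pos < a.length)
    (E : ∀ j, 0 < j → j < a.length → pvAnc pos ((j - 1) / 2) = true → (j - 1) / 2 ≠ pos →
      pvEdgeOK a j) :
    (pvSiftup a pos).length = a.length ∧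
    (∀ m, pvAnc pos m = false → (pvSiftup a pos).getD m pvD = a.getD m pvD) ∧
    (∀ j, 0 < j → j < a.length → pvAnc pos ((j - 1) / 2) = true → pvEdgeOK (pvSiftup a pos) j) ∧
    ((pvSiftup a pos : List _) : Multiset (Int × Int × Int)) = (a : Multiset _) := by
  obtain ⟨len1, plt, panc, pleaf, unt, edges, ms⟩ :=
    pvSu_spec pos (a.length - pos) a pos rfl hlen (pvAnc_self pos) E (fun h => absurd rfl h)
  set r := pvSiftupLoop a pos with hr
  set newitem := a.getD pos pvD with hni
  have hres : pvSiftup a pos = pvSiftdownLoop ((r.1.set r.2 newitem).getD r.2 pvD)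
      (r.1.set r.2 newitem) pos r.2 := rfl
  set b := r.1.set r.2 newitem with hb
  have hblen : b.length = a.length := by simp [hb, len1]
  have hgb_self : b.getD r.2 pvD = newitem := pvGetD_set_self (by rw [len1]; exact plt) _ _
  have hgb_other : ∀ m, m ≠ r.2 → b.getD m pvD = r.1.getD m pvD := fun m hm =>
    pvGetD_set_ne (Ne.symm hm) _ _
  rw [hres, hgb_self]
  have H1 : ∀ j, 0 < j → j < b.length → pvAnc pos ((j - 1) / 2) = true → j ≠ r.2 →
      pvEdgeOK b j := by
    intro j hj hjl hap hjr
    rw [hblen] at hjl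
    have hparnr : (j - 1) / 2 ≠ r.2 := by omega
    unfold pvEdgeOK
    rw [hgb_other _ hparnr, hgb_other j hjr]
    exact edges j hj hjl hap hparnr
  have H2 : ∀ c, (c = 2 * r.2 + 1 ∨ c = 2 * r.2 + 2) → c < b.length →
      pvLe newitem (b.getD c pvD) = true := by
    intro c hc hcl; rw [hblen] at hcl; omega
  have H3 : (r.2 ≠ pos) → ∀ c, (c = 2 * r.2 + 1 ∨ c = 2 * r.2 + 2) → c < b.length →
      pvLe (b.getD ((r.2 - 1) / 2) pvD) (b.getD c pvD) = true := by
    intro _ c hc hcl; rw [hblen] at hcl; omega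
  obtain ⟨len2, unt2, edges2, ms2⟩ :=
    pvSd_spec newitem pos r.2 b (by rw [hblen]; exact plt) panc H1 H2 H3
  refine ⟨by rw [len2, hblen], ?_, ?_, ?_⟩
  · intro m hm
    have hmr : m ≠ r.2 := fun h => by rw [h] at hm; rw [panc] at hm; simp at hm
    rw [unt2 m hm, hgb_other m hmr, unt m hm]
  · intro j hj hjl hap
    exact edges2 j hj (by rw [hblen]; exact hjl) hap
  · rw [ms2, hb, List.set_set]
    rw [ms newitem]
    have e := pvMsSet a pos hlen newitem
    rw [← hni] at e
    have : ((a.set pos newitem : List _) : Multiset (Int × Int × Int)) + {newitem}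
        = (a : Multiset _) + {newitem} := by
      rw [e, add_comm]
    exact add_right_cancel this

theorem pvHeapifyGo_spec : ∀ (m : Nat) (a : List (Int × Int × Int)), 2 * m ≤ a.length →
    (∀ j, 0 < j → j < a.length → m ≤ (j - 1) / 2 → pvEdgeOK a j) →
    ((List.range m).reverse.foldl (fun h i => pvSiftup h i) a).length = a.length ∧
    pvIsHeap ((List.range m).reverse.foldl (fun h i => pvSiftup h i) a) ∧
    (((List.range m).reverse.foldl (fun h i => pvSiftup h i) a : List _) :
      Multiset (Int × Int × Int)) = (a : Multiset _) := by
  intro m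
  induction m with
  | zero =>
    intro a _ hJ
    refine ⟨by simp, ?_, by simp⟩
    intro j hj hjl
    simp only [List.range_zero, List.reverse_nil, List.foldl_nil] at *
    exact hJ j hj hjl (by omega)
  | succ m ih =>
    intro a hm hJ
    have hrange : (List.range (m + 1)).reverse = m :: (List.range m).reverse := by
      rw [List.range_succ, List.reverse_append]; simp
    rw [hrange, List.foldl_cons]
    have hmlen : m < a.length := by omega
    obtain ⟨len1, unt1, edges1, ms1⟩ := pvSiftup_spec a m hmlen (by
      intro j hj hjl hap hne
      have := pvAnc_le hap
      exact hJ j hj hjl (by omega))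
    have hJ' : ∀ j, 0 < j → j < (pvSiftup a m).length → m ≤ (j - 1) / 2 →
        pvEdgeOK (pvSiftup a m) j := by
      intro j hj hjl hle
      rw [len1] at hjl
      by_cases hanc : pvAnc m ((j - 1) / 2) = true
      · exact edges1 j hj hjl hanc
      · have hjne : pvAnc m j = false := by
          by_contra hx
          simp only [Bool.not_eq_false] at hx
          have hjm : j ≠ m := by omega
          rw [pvAnc_parent hx hjm] at hanc
          simp at hanc
        have hpm : (j - 1) / 2 ≠ m := fun h => by rw [h, pvAnc_self] at hanc; simp at hanc
        unfold pvEdgeOK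
        rw [unt1 _ (by simpa using hanc), unt1 _ (by simpa using hjne)]
        exact hJ j hj hjl (by omega)
    obtain ⟨len2, heap2, ms2⟩ := ih (pvSiftup a m) (by rw [len1]; omega) hJ'
    exact ⟨by rw [len2, len1], heap2, by rw [ms2, ms1]⟩

theorem pvHeapify_spec (a : List (Int × Int × Int)) :
    (pvHeapify a).length = a.length ∧ pvIsHeap (pvHeapify a) ∧
    ((pvHeapify a : List _) : Multiset (Int × Int × Int)) = (a : Multiset _) := by
  unfold pvHeapify
  exact pvHeapifyGo_spec (a.length / 2) a (by omega) (by intro j hj hjl hle; omega)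

theorem pvRootMin (a : List (Int × Int × Int)) (h : pvIsHeap a) :
    ∀ j, j < a.length → pvLe (a.getD 0 pvD) (a.getD j pvD) = true := by
  intro j
  induction j using Nat.strong_induction_on with
  | _ j ih =>
    intro hjl
    rcases Nat.eq_zero_or_pos j with hj | hj
    · subst hj; exact pvLe_refl _
    · exact pvLe_trans (ih ((j - 1) / 2) (by omega) (by omega)) (h j hj hjl)

theorem pvPush_spec (h : List (Int × Int × Int)) (x : Int × Int × Int) (hh : pvIsHeap h) :
    pvIsHeap (pvHeappush h x) ∧ (pvHeappush h x).length = h.length + 1 ∧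
    ((pvHeappush h x : List _) : Multiset (Int × Int × Int)) = {x} + (h : Multiset _) := by
  have hlen : (h ++ [x]).length = h.length + 1 := by simp
  have hpos : (h ++ [x]).length - 1 = h.length := by simp
  have hget : (h ++ [x]).getD h.length pvD = x := by
    simp [List.getD]
  have hgl : ∀ i, i < h.length → (h ++ [x]).getD i pvD = h.getD i pvD := by
    intro i hi
    simp [List.getD, List.getElem?_append_left hi]
  have hres : pvHeappush h x = pvSiftdownLoop x (h ++ [x]) 0 h.length := by
    unfold pvHeappush pvSiftdown
    rw [hpos, hget]
  obtain ⟨len1, _, edges1, ms1⟩ := pvSd_spec x 0 h.length (h ++ [x])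
    (by omega) (pvAnc_zero _)
    (by
      intro j hj hjl hap hjne
      rw [hlen] at hjl
      have hjlt : j < h.length := by omega
      unfold pvEdgeOK
      rw [hgl j hjlt, hgl ((j - 1) / 2) (by omega)]
      exact hh j hj hjlt)
    (by intro c hc hcl; rw [hlen] at hcl; omega)
    (by intro _ c hc hcl; rw [hlen] at hcl; omega)
  rw [hres]
  refine ⟨?_, by rw [len1, hlen], ?_⟩
  · intro j hj hjl
    exact edges1 j hj (by rw [len1] at hjl; exact hjl) (pvAnc_zero _)
  · rw [ms1]
    have e := pvMsSet (h ++ [x]) h.length (by omega) x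
    rw [hget] at e
    have hco : ((h ++ [x] : List _) : Multiset (Int × Int × Int)) = (h : Multiset _) + {x} := rfl
    rw [hco] at e
    have key : ((((h ++ [x]).set h.length x : List _)) : Multiset (Int × Int × Int)) + {x}
        = ({x} + (h : Multiset _)) + {x} := by rw [e]; abel
    exact add_right_cancel key

theorem pvPop_spec (hp : List (Int × Int × Int)) (hh : pvIsHeap hp) (hne : hp ≠ []) :
    pvIsHeap (pvHeappop hp).2 ∧ (pvHeappop hp).2.length + 1 = hp.length ∧
    ((hp : List _) : Multiset (Int × Int × Int)) = {(pvHeappop hp).1} + ↑(pvHeappop hp).2 ∧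
    (pvHeappop hp).1 ∈ hp ∧ (∀ y ∈ hp, pvLe (pvHeappop hp).1 y = true) := by
  by_cases hE : hp.dropLast = []
  · have hlen1 : hp.length = 1 := by
      have h1 : hp.dropLast.length = hp.length - 1 := List.length_dropLast
      rw [hE] at h1
      simp at h1
      have h2 : hp.length ≠ 0 := by simpa using hne
      omega
    obtain ⟨z, hz⟩ := List.length_eq_one_iff.mp hlen1
    subst hz
    have hpop : pvHeappop [z] = (z, []) := by
      simp [pvHeappop]
    rw [hpop]
    refine ⟨fun j hj hjl => by simp at hjl, by simp, by simp, by simp, ?_⟩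
    intro y hy
    simp at hy
    rw [hy]
    exact pvLe_refl _
  · set rest := hp.dropLast with hrest
    set last := hp.getLast hne with hlast
    have hsplit : hp = rest ++ [last] := by
      rw [hrest, hlast]
      exact (List.dropLast_concat_getLast hne).symm
    have hrne : rest ≠ [] := hE
    have hrlen : 0 < rest.length := List.length_pos_iff.mpr hrne
    have hpop : pvHeappop hp = (rest.getD 0 pvD, pvSiftup (rest.set 0 last) 0) := by
      simp only [pvHeappop]
      rw [show hp.getLast? = some last from by
        rw [hlast]; exact List.getLast?_eq_some_getLast hne]
      rw [← hrest]
      simp only [Option.getD_some]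
      rw [if_neg (by simpa using hrne)]
    set a := rest.set 0 last with ha
    have halen : a.length = rest.length := by simp [ha]
    have hplen : hp.length = rest.length + 1 := by rw [hsplit]; simp
    have hgl : ∀ i, i < rest.length → hp.getD i pvD = rest.getD i pvD := by
      intro i hi
      rw [hsplit]
      simp [List.getD, List.getElem?_append_left hi]
    obtain ⟨len1, unt1, edges1, ms1⟩ := pvSiftup_spec a 0 (by omega) (by
      intro j hj hjl hap hne0
      have hj2 : 1 ≤ (j - 1) / 2 := by omega
      unfold pvEdgeOK
      rw [ha, pvGetD_set_ne (by omega) _ _, pvGetD_set_ne (by omega : (0:Nat) ≠ j) _ _]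
      rw [halen] at hjl
      rw [← hgl j hjl, ← hgl ((j - 1) / 2) (by omega)]
      exact hh j hj (by omega))
    rw [hpop]
    have hmem : rest.getD 0 pvD ∈ hp := by
      rw [List.getD_eq_getElem rest pvD hrlen]
      rw [hsplit]
      exact List.mem_append_left _ (List.getElem_mem hrlen)
    refine ⟨?_, by rw [len1, halen]; omega, ?_, hmem, ?_⟩
    · intro j hj hjl
      exact edges1 j hj (by rwa [len1] at hjl) (pvAnc_zero _)
    · have e := pvMsSet rest 0 hrlen last
      rw [← ha] at e
      have hcoe : ((hp : List _) : Multiset (Int × Int × Int)) = (rest : Multiset _) + {last} := by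
        rw [hsplit]; rfl
      rw [hcoe, ms1]
      calc (rest : Multiset (Int × Int × Int)) + {last}
          = {last} + (rest : Multiset _) := by rw [add_comm]
        _ = ((a : List _) : Multiset (Int × Int × Int)) + {rest.getD 0 pvD} := e.symm
        _ = {rest.getD 0 pvD} + ((a : List _) : Multiset (Int × Int × Int)) := by rw [add_comm]
    · intro y hy
      have hg0 : hp.getD 0 pvD = rest.getD 0 pvD := hgl 0 hrlen
      obtain ⟨j, hjl, hjy⟩ := List.mem_iff_getElem.mp hy
      have := pvRootMin hp hh j hjl
      rw [hg0, List.getD_eq_getElem hp pvD hjl, hjy] at this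
      exact this

-- the multiset of live (front, list index, offset) tuples that A's heap holds
def pvCanon (L rest : List (List Int)) : List (Int × Int × Int) :=
  (List.range rest.length).map (fun i =>
    (((rest.getD i []).headD 0 : Int), (i : Int),
      ((L.getD i []).length : Int) - ((rest.getD i []).length : Int)))

theorem pvCanon_length (L rest : List (List Int)) : (pvCanon L rest).length = rest.length := by
  simp [pvCanon]

theorem pvCanon_getElem (L rest : List (List Int)) (i : Nat) (h : i < rest.length) :
    (pvCanon L rest)[i]'(by rw [pvCanon_length]; exact h) =
      (((rest.getD i []).headD 0 : Int), (i : Int),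
        ((L.getD i []).length : Int) - ((rest.getD i []).length : Int)) := by
  simp [pvCanon]

theorem pvCanon_getD (L rest : List (List Int)) (i : Nat) (h : i < rest.length) :
    (pvCanon L rest).getD i pvD =
      (((rest.getD i []).headD 0 : Int), (i : Int),
        ((L.getD i []).length : Int) - ((rest.getD i []).length : Int)) := by
  rw [List.getD_eq_getElem _ _ (by rw [pvCanon_length]; exact h)]
  exact pvCanon_getElem L rest i h

-- the element of the canon multiset picked out by B (first minimal front) is its
-- lexicographic minimum
theorem pvCanon_min (L rest : List (List Int)) {m : Int} {j : Nat}
    (hm : PySem.List.min? (pvFronts rest) (fun x => x) = some m)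
    (hj : PySem.List.index? (pvFronts rest) m = some j) :
    j < rest.length ∧ (rest.getD j []).headD 0 = m ∧
    (∀ y ∈ pvCanon L rest, pvLe ((pvCanon L rest).getD j pvD) y = true) := by
  obtain ⟨hjlen, hgetj, hfirst⟩ := PySem.List.getElem_of_index?_eq_some hj
  have hflen : (pvFronts rest).length = rest.length := by simp [pvFronts]
  have hjr : j < rest.length := by rwa [hflen] at hjlen
  have hfront : ∀ (i : Nat) (h : i < rest.length),
      (pvFronts rest)[i]'(by rwa [hflen]) = (rest.getD i []).headD 0 := by
    intro i h
    simp [pvFronts, List.getElem?_eq_getElem h]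
  have hmin := PySem.List.min?_isMin hm
  have hjval : (rest.getD j []).headD 0 = m := by rw [← hfront j hjr]; exact hgetj
  refine ⟨hjr, hjval, ?_⟩
  intro y hy
  rw [pvCanon_getD L rest j hjr, hjval]
  rw [pvCanon, List.mem_map] at hy
  obtain ⟨i, hi, rfl⟩ := hy
  have hir : i < rest.length := List.mem_range.mp hi
  have hmle : m ≤ (rest.getD i []).headD 0 := by
    rw [← hfront i hir]
    exact hmin _ (List.getElem_mem _)
  rw [pvLe_iff]
  simp only
  intro hcon
  rcases hcon with hlt | ⟨heq, hrest⟩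
  · omega
  · have hine : ¬ (i < j) := fun hij => hfirst i hij (by rw [hfront i hir]; omega)
    rcases hrest with hlt2 | ⟨heq2, hlt3⟩
    · have : (i : Int) < (j : Int) := hlt2
      omega
    · have : (i : Int) = (j : Int) := heq2
      have hij : i = j := by omega
      subst hij
      omega

-- the simulation invariant between A's loop state (heap) and B's (suffix lists)
def pvInv (L rest : List (List Int)) (heap : List (Int × Int × Int)) : Prop :=
  rest.length = L.length ∧ 2 ≤ L.length ∧
  (∀ i, i < rest.length →
    ∃ o : Nat, rest.getD i [] = (L.getD i []).drop o ∧ o < (L.getD i []).length) ∧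
  pvIsHeap heap ∧
  ((heap : List _) : Multiset (Int × Int × Int)) = ((pvCanon L rest : List _) : Multiset _)

theorem pvLoop_eq : ∀ (fuel : Nat) (L rest : List (List Int))
    (heap : List (Int × Int × Int)) (hi best : Int),
    pvInv L rest heap → pvALoop L fuel heap hi best = pvBLoop fuel rest hi best := by
  intro fuel
  induction fuel with
  | zero => intro L rest heap hi best _; rfl
  | succ fuel ih =>
    intro L rest heap hi best hInv
    obtain ⟨hlenLR, hk2, hsuf, hheap, hms⟩ := hInv
    have hrlen2 : 2 ≤ rest.length := by omega
    have hrne : rest ≠ [] := by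
      intro h; rw [h] at hrlen2; simp at hrlen2
    have hfne : pvFronts rest ≠ [] := by
      simp only [pvFronts, ne_eq, List.map_eq_nil_iff]; exact hrne
    obtain ⟨m, hm⟩ : ∃ m, PySem.List.min? (pvFronts rest) (fun x => x) = some m := by
      cases h : PySem.List.min? (pvFronts rest) (fun x => x)
      · exact absurd ((PySem.List.min?_eq_none_iff _ _).mp h) hfne
      · exact ⟨_, rfl⟩
    obtain ⟨j, hj⟩ : ∃ j, PySem.List.index? (pvFronts rest) m = some j := by
      cases h : PySem.List.index? (pvFronts rest) m
      · rw [PySem.List.index?_eq_none_iff] at h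
        exact absurd (PySem.List.min?_mem hm) h
      · exact ⟨_, rfl⟩
    obtain ⟨hjr, hjfront, hjmin⟩ := pvCanon_min L rest hm hj
    have hheaplen : heap.length = rest.length := by
      have hc := congrArg Multiset.card hms
      simpa [pvCanon_length] using hc
    have hhne : heap ≠ [] := by
      intro h; rw [h] at hheaplen; simp at hheaplen; omega
    obtain ⟨hIsH1, hlen1, hmsPop, htmem, htmin⟩ := pvPop_spec heap hheap hhne
    have hmemCanonIff : ∀ y, y ∈ heap ↔ y ∈ pvCanon L rest := by
      intro y
      constructor
      · intro hy
        have h2 : y ∈ ((heap : List _) : Multiset (Int × Int × Int)) := by simpa using hy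
        rw [hms] at h2; simpa using h2
      · intro hy
        have h2 : y ∈ ((pvCanon L rest : List _) : Multiset (Int × Int × Int)) := by simpa using hy
        rw [← hms] at h2; simpa using h2
    obtain ⟨o, hsufj, holt⟩ := hsuf j hjr
    have hlenR : (rest.getD j []).length = (L.getD j []).length - o := by
      rw [hsufj, List.length_drop]
    have hlenR1 : 1 ≤ (rest.getD j []).length := by omega
    have htup : (pvHeappop heap).1 = (m, (j : Int),
        ((L.getD j []).length : Int) - ((rest.getD j []).length : Int)) := by
      have h1le := hjmin _ ((hmemCanonIff _).mp htmem)
      have htjmem : (pvCanon L rest).getD j pvD ∈ heap := by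
        rw [hmemCanonIff]
        rw [List.getD_eq_getElem _ _ (by rw [pvCanon_length]; exact hjr)]
        exact List.getElem_mem _
      have := pvLe_antisymm (htmin _ htjmem) h1le
      rw [this, pvCanon_getD L rest j hjr, hjfront]
    -- unfold one step of both loops
    simp only [pvALoop, pvBLoop, htup, hm, Option.getD_some, hj]
    rw [PySem.List.pyGet?_natCast L j]
    simp only [← List.getD_eq_getElem?_getD]
    by_cases hone : (rest.getD j []).length = 1
    · rw [if_pos (by omega)]
      rw [if_pos (show ((rest.getD j []).length == 1) = true from by
        rw [beq_iff_eq]; exact hone)]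
    · rw [if_neg (by omega)]
      rw [if_neg (show ¬ ((rest.getD j []).length == 1) = true from by
        rw [beq_iff_eq]; exact hone)]
      have hlenR2 : 2 ≤ (rest.getD j []).length := by omega
      have hoff : ((L.getD j []).length : Int) - ((rest.getD j []).length : Int) + 1
          = ((o + 1 : Nat) : Int) := by push_cast; omega
      rw [hoff, PySem.List.pyGet?_natCast, ← List.getD_eq_getElem?_getD]
      have hp : ((rest.set j (rest.getD j []).tail).getD j []).headD 0
          = (L.getD j []).getD (o + 1) 0 := by
        rw [pvGetD_set_self hjr, hsufj, List.tail_drop, pvHeadD_drop]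
      rw [hp]
      set P := (L.getD j []).getD (o + 1) 0 with hP
      set nt : Int × Int × Int := (P, (j : Int), ((o + 1 : Nat) : Int)) with hnt
      set rest' := rest.set j (rest.getD j []).tail with hrest'
      obtain ⟨heap2, hlen2, hms2⟩ := pvPush_spec (pvHeappop heap).2 nt hIsH1
      have hr'len : rest'.length = rest.length := by simp [hrest']
      have hcanon' : pvCanon L rest' = (pvCanon L rest).set j nt := by
        apply List.ext_getElem
        · simp [pvCanon_length, hr'len]
        · intro i h1i h2i
          have hir : i < rest.length := by
            rw [pvCanon_length, hr'len] at h1i; exact h1i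
          rw [pvCanon_getElem L rest' i (by rwa [hr'len])]
          by_cases hij : i = j
          · subst hij
            rw [List.getElem_set_self (by simpa [pvCanon_length] using hir)]
            rw [show rest'.getD i [] = (rest.getD i []).tail from pvGetD_set_self hir _ _]
            rw [hnt, hP]
            have hlt : (rest.getD i []).tail.length = (rest.getD i []).length - 1 :=
              List.length_tail
            rw [hsufj, List.tail_drop, pvHeadD_drop]
            refine Prod.ext rfl (Prod.ext rfl ?_)
            simp only [List.length_drop]
            push_cast
            omega
          · rw [List.getElem_set_ne (fun h => hij h.symm)]
            rw [pvCanon_getElem L rest i hir]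
            rw [show rest'.getD i [] = rest.getD i [] from pvGetD_set_ne (Ne.symm hij) _ _]
      have hcgj : (pvCanon L rest).getD j pvD = (m, (j : Int),
          ((L.getD j []).length : Int) - ((rest.getD j []).length : Int)) := by
        rw [pvCanon_getD L rest j hjr, hjfront]
      have hms' : ((pvHeappush (pvHeappop heap).2 nt : List _) : Multiset (Int × Int × Int))
          = ((pvCanon L rest' : List _) : Multiset _) := by
        rw [hcanon', hms2]
        have e := pvMsSet (pvCanon L rest) j (by rw [pvCanon_length]; exact hjr) nt
        rw [hcgj] at e
        have hcoe : ((pvCanon L rest : List _) : Multiset (Int × Int × Int))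
            = {(m, (j : Int), ((L.getD j []).length : Int) - ((rest.getD j []).length : Int))}
              + ((pvHeappop heap).2 : Multiset _) := by
          rw [← hms, hmsPop, htup]
        rw [hcoe] at e
        have key : ({nt} + ((pvHeappop heap).2 : Multiset (Int × Int × Int)))
              + {(m, (j : Int), ((L.getD j []).length : Int) - ((rest.getD j []).length : Int))}
            = (((pvCanon L rest).set j nt : List _) : Multiset (Int × Int × Int))
              + {(m, (j : Int), ((L.getD j []).length : Int) - ((rest.getD j []).length : Int))} := by
          rw [e]; abel
        exact add_right_cancel key
      -- the root of the pushed heap is the minimal front of rest'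
      have hr'ne : rest' ≠ [] := by
        intro h; rw [h] at hr'len; simp at hr'len; omega
      have hf'ne : pvFronts rest' ≠ [] := by
        simp only [pvFronts, ne_eq, List.map_eq_nil_iff]; exact hr'ne
      obtain ⟨m2, hm2⟩ : ∃ m2, PySem.List.min? (pvFronts rest') (fun x => x) = some m2 := by
        cases h : PySem.List.min? (pvFronts rest') (fun x => x)
        · exact absurd ((PySem.List.min?_eq_none_iff _ _).mp h) hf'ne
        · exact ⟨_, rfl⟩
      obtain ⟨j2, hj2⟩ : ∃ j2, PySem.List.index? (pvFronts rest') m2 = some j2 := by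
        cases h : PySem.List.index? (pvFronts rest') m2
        · rw [PySem.List.index?_eq_none_iff] at h
          exact absurd (PySem.List.min?_mem hm2) h
        · exact ⟨_, rfl⟩
      obtain ⟨hj2r, hj2front, hj2min⟩ := pvCanon_min L rest' hm2 hj2
      have hroot : ((pvHeappush (pvHeappop heap).2 nt).getD 0 pvD).1 = m2 := by
        set h2 := pvHeappush (pvHeappop heap).2 nt with hh2
        have hh2len : 0 < h2.length := by rw [hlen2]; omega
        have hrootmem : h2.getD 0 pvD ∈ h2 := by
          rw [List.getD_eq_getElem _ _ hh2len]
          exact List.getElem_mem _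
        have hrootmin : ∀ y ∈ h2, pvLe (h2.getD 0 pvD) y = true := by
          intro y hy
          obtain ⟨jj, hjjl, hjjy⟩ := List.mem_iff_getElem.mp hy
          have := pvRootMin h2 heap2 jj hjjl
          rwa [List.getD_eq_getElem h2 pvD hjjl, hjjy] at this
        have hmem2 : ∀ y, y ∈ h2 ↔ y ∈ pvCanon L rest' := by
          intro y
          constructor
          · intro hy
            have h3 : y ∈ ((h2 : List _) : Multiset (Int × Int × Int)) := by simpa using hy
            rw [hms'] at h3; simpa using h3
          · intro hy
            have h3 : y ∈ ((pvCanon L rest' : List _) : Multiset (Int × Int × Int)) := by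
              simpa using hy
            rw [← hms'] at h3; simpa using h3
        have htj2mem : (pvCanon L rest').getD j2 pvD ∈ h2 := by
          rw [hmem2]
          rw [List.getD_eq_getElem _ _ (by rw [pvCanon_length]; exact hj2r)]
          exact List.getElem_mem _
        have heq2 : h2.getD 0 pvD = (pvCanon L rest').getD j2 pvD :=
          pvLe_antisymm (hrootmin _ htj2mem) (hj2min _ ((hmem2 _).mp hrootmem))
        rw [heq2, pvCanon_getD L rest' j2 hj2r, hj2front]
      rw [hroot]
      have hbest : (if max hi P - m2 + 1 < best then max hi P - m2 + 1 else best)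
          = min best (max hi P - m2 + 1) := by
        rw [min_def]; split <;> split <;> omega
      rw [hbest, hm2, Option.getD_some]
      apply ih
      refine ⟨by rw [hr'len, hlenLR], hk2, ?_, heap2, hms'⟩
      intro i hi'
      rw [hr'len] at hi'
      by_cases hij : i = j
      · subst hij
        refine ⟨o + 1, ?_, by omega⟩
        rw [show rest'.getD i [] = (rest.getD i []).tail from pvGetD_set_self hi' _ _]
        rw [hsufj, List.tail_drop]
      · obtain ⟨oi, hoi, hoilt⟩ := hsuf i hi'
        refine ⟨oi, ?_, hoilt⟩
        rw [show rest'.getD i [] = rest.getD i [] from pvGetD_set_ne (Ne.symm hij) _ _]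
        exact hoi

-- the pointer list that A's build loop produces
def pvPtrs : List (List Int) → Int → List (Int × Int × Int)
  | [], _ => []
  | pl :: tl, i => (pl.headD 0, i, 0) :: pvPtrs tl (i + 1)

theorem pvBuild_none : ∀ (pls : List (List Int)) (i : Int) (ptrs : List (Int × Int × Int))
    (mx : Int), pvBuildGo pls i ptrs mx = none ↔ pls.any (fun pl => pl.isEmpty) = true
  | [], i, ptrs, mx => by simp [pvBuildGo]
  | [] :: tl, i, ptrs, mx => by simp [pvBuildGo]
  | (p0 :: pl) :: tl, i, ptrs, mx => by
    simp only [pvBuildGo, List.any_cons, List.isEmpty_cons, Bool.false_or]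
    exact pvBuild_none tl (i + 1) (ptrs ++ [(p0, i, 0)]) (max mx p0)

theorem pvBuild_some : ∀ (pls : List (List Int)) (i : Int) (ptrs : List (Int × Int × Int))
    (mx : Int), pls.any (fun pl => pl.isEmpty) = false →
    pvBuildGo pls i ptrs mx
      = some (ptrs ++ pvPtrs pls i, pls.foldl (fun mm pl => max mm (pl.headD 0)) mx)
  | [], i, ptrs, mx, _ => by simp [pvBuildGo, pvPtrs]
  | [] :: tl, i, ptrs, mx, h => by simp at h
  | (p0 :: pl) :: tl, i, ptrs, mx, h => by
    simp only [List.any_cons, Bool.or_eq_false_iff] at h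
    simp only [pvBuildGo, pvPtrs, List.foldl_cons, List.headD_cons]
    rw [pvBuild_some tl (i + 1) (ptrs ++ [(p0, i, 0)]) (max mx p0) h.2]
    rw [List.append_assoc, List.singleton_append]

theorem pvPtrs_length : ∀ (pls : List (List Int)) (i : Int), (pvPtrs pls i).length = pls.length
  | [], _ => rfl
  | pl :: tl, i => by simp [pvPtrs, pvPtrs_length tl (i + 1)]

theorem pvPtrs_getElem : ∀ (pls : List (List Int)) (i : Int) (d : Nat) (hd : d < pls.length),
    (pvPtrs pls i)[d]'(by rw [pvPtrs_length]; exact hd)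
      = ((pls[d]).headD 0, i + (d : Int), 0)
  | pl :: tl, i, 0, hd => by simp [pvPtrs]
  | pl :: tl, i, d + 1, hd => by
    simp only [pvPtrs, List.getElem_cons_succ]
    rw [pvPtrs_getElem tl (i + 1) d (by simpa using hd)]
    refine Prod.ext rfl (Prod.ext ?_ rfl)
    simp only
    push_cast
    ring

theorem pvPtrs_canon (L : List (List Int)) : pvPtrs L 0 = pvCanon L L := by
  apply List.ext_getElem
  · rw [pvPtrs_length, pvCanon_length]
  · intro d h1 h2
    rw [pvPtrs_length] at h1
    rw [pvPtrs_getElem L 0 d h1, pvCanon_getElem L L d h1]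
    refine Prod.ext ?_ (Prod.ext ?_ ?_)
    · simp [List.getElem?_eq_getElem h1]
    · simp
    · simp

-- the root of any heap holding the canon multiset is the minimal front
theorem pvRootFront (L rest : List (List Int)) (h2 : List (Int × Int × Int))
    (hIsH : pvIsHeap h2) (hlen : 0 < h2.length)
    (hmseq : ((h2 : List _) : Multiset (Int × Int × Int))
      = ((pvCanon L rest : List _) : Multiset _)) (hrne : rest ≠ []) :
    (h2.getD 0 pvD).1 = (PySem.List.min? (pvFronts rest) (fun x => x)).getD 0 := by
  have hf'ne : pvFronts rest ≠ [] := by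
    simp only [pvFronts, ne_eq, List.map_eq_nil_iff]; exact hrne
  obtain ⟨m2, hm2⟩ : ∃ m2, PySem.List.min? (pvFronts rest) (fun x => x) = some m2 := by
    cases h : PySem.List.min? (pvFronts rest) (fun x => x)
    · exact absurd ((PySem.List.min?_eq_none_iff _ _).mp h) hf'ne
    · exact ⟨_, rfl⟩
  obtain ⟨j2, hj2⟩ : ∃ j2, PySem.List.index? (pvFronts rest) m2 = some j2 := by
    cases h : PySem.List.index? (pvFronts rest) m2
    · rw [PySem.List.index?_eq_none_iff] at h
      exact absurd (PySem.List.min?_mem hm2) h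
    · exact ⟨_, rfl⟩
  obtain ⟨hj2r, hj2front, hj2min⟩ := pvCanon_min L rest hm2 hj2
  have hrootmem : h2.getD 0 pvD ∈ h2 := by
    rw [List.getD_eq_getElem _ _ hlen]
    exact List.getElem_mem _
  have hrootmin : ∀ y ∈ h2, pvLe (h2.getD 0 pvD) y = true := by
    intro y hy
    obtain ⟨jj, hjjl, hjjy⟩ := List.mem_iff_getElem.mp hy
    have := pvRootMin h2 hIsH jj hjjl
    rwa [List.getD_eq_getElem h2 pvD hjjl, hjjy] at this
  have hmem2 : ∀ y, y ∈ h2 ↔ y ∈ pvCanon L rest := by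
    intro y
    constructor
    · intro hy
      have h3 : y ∈ ((h2 : List _) : Multiset (Int × Int × Int)) := by simpa using hy
      rw [hmseq] at h3; simpa using h3
    · intro hy
      have h3 : y ∈ ((pvCanon L rest : List _) : Multiset (Int × Int × Int)) := by simpa using hy
      rw [← hmseq] at h3; simpa using h3
  have htj2mem : (pvCanon L rest).getD j2 pvD ∈ h2 := by
    rw [hmem2]
    rw [List.getD_eq_getElem _ _ (by rw [pvCanon_length]; exact hj2r)]
    exact List.getElem_mem _
  have heq2 : h2.getD 0 pvD = (pvCanon L rest).getD j2 pvD :=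
    pvLe_antisymm (hrootmin _ htj2mem) (hj2min _ ((hmem2 _).mp hrootmem))
  rw [heq2, pvCanon_getD L rest j2 hj2r, hj2front, hm2, Option.getD_some]

-- ===== VERDICT (by name: the statement is the Claim_ definition above) =====
theorem min_window_size_py_spec : Claim_equal_min_window_size_py := by
  unfold Claim_equal_min_window_size_py Spec_min_window_size_py
  intro L _
  unfold min_window_size_py min_window_size_py_alt
  by_cases hk : L.length ≤ 1
  · rw [if_pos hk, if_pos hk]
  · rw [if_neg hk, if_neg hk]
    by_cases hE : L.any (fun pl => pl.isEmpty) = true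
    · rw [(pvBuild_none L 0 [] 0).mpr hE, if_pos hE]
    · have hE' : L.any (fun pl => pl.isEmpty) = false := by
        cases h : L.any (fun pl => pl.isEmpty) with
        | false => rfl
        | true => exact absurd h hE
      rw [pvBuild_some L 0 [] 0 hE', if_neg hE]
      simp only [List.nil_append, pvPtrs_canon]
      obtain ⟨hhl, hhheap, hhms⟩ := pvHeapify_spec (pvCanon L L)
      have hk2 : 2 ≤ L.length := by omega
      have hLne : L ≠ [] := by
        intro h; rw [h] at hk2; simp at hk2
      have hhlen : 0 < (pvHeapify (pvCanon L L)).length := by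
        rw [hhl, pvCanon_length]; omega
      rw [pvRootFront L L (pvHeapify (pvCanon L L)) hhheap hhlen hhms hLne]
      apply pvLoop_eq
      refine ⟨rfl, hk2, ?_, hhheap, hhms⟩
      intro i hi
      refine ⟨0, by simp, ?_⟩
      have hmem : L.getD i [] ∈ L := by
        rw [List.getD_eq_getElem L [] hi]
        exact List.getElem_mem _
      have hne2 : L.getD i [] ≠ [] := by
        intro hnil
        exact hE (List.any_eq_true.mpr ⟨L.getD i [], hmem, by rw [hnil]; rfl⟩)
      exact List.length_pos_iff.mpr hne2
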